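-- pv_equiv track=rewrite | github.com/TomBugnon/deNEST | spiking_visnet/analysis/activity.py | isi
-- ===== SOURCE A (Python) =====
-- def isi(spike_train):
--     """Return the inter-spike intervals of a list-like of 0 and 1."""
--     spike_times = [t for t, spike in enumerate(spike_train) if spike]
--     if not spike_times:
--         return []
--     return [
--         spike_times[i + 1] - spike_times[i]
--         for i in range(len(spike_times) - 1)
--     ]
-- ===== SOURCE B (Python) =====
-- def isi(spike_train):
--     """Return the inter-spike intervals of a list-like of 0 and 1."""
--     intervals = []
--     last = None
--     for t, spike in enumerate(spike_train):
--         if spike: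
--             if last is not None:
--                 intervals.append(t - last)
--             last = t
--     return intervals
-- ===== Notes on version B (the rewrite author's own statement) =====
-- stated objective: simpler
-- what changed: Replaces the two-phase build-index-list-then-take-pairwise-differences with a single pass that keeps only the previous spike time in a scalar and appends each difference immediately.
import Mathlib
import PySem

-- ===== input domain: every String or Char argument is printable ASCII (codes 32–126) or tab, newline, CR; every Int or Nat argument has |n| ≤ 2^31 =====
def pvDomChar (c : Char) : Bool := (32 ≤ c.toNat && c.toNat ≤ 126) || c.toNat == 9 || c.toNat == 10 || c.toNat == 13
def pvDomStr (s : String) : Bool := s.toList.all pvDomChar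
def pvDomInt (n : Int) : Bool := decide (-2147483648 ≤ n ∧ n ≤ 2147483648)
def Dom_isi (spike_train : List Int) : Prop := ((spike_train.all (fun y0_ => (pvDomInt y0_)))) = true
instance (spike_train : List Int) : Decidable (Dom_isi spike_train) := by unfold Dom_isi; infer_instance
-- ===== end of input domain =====

-- B replaces A's two-phase index-list-then-pairwise-differences with a single pass
-- keeping only the previous spike time in a scalar (objective: simpler).

-- ===== PORT A =====
-- spike_times = [t for t, spike in enumerate(spike_train) if spike]; then pairwise
-- differences by index.  All indices i, i+1 are in range, so getD's default 0 is never used.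
def isi (spike_train : List Int) : List Int :=
  let spike_times : List Int :=
    ((PySem.List.enumerate spike_train).filter (fun p => p.2 != 0)).map (fun p => p.1)
  if spike_times = [] then []
  else (List.range (spike_times.length - 1)).map
    (fun i => spike_times.getD (i + 1) 0 - spike_times.getD i 0)

-- ===== PORT B =====
-- one loop iteration of Source B: state = (last, intervals); Python's O(1) list append
-- is represented as cons to the front with one final reverse (same resulting list).
def isiStep (s : Option Int × List Int) (p : Int × Int) : Option Int × List Int :=
  if p.2 != 0 then
    match s.1 with
    | some last => (some p.1, (p.1 - last) :: s.2)
    | none => (some p.1, s.2)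
  else s

def isi_alt (spike_train : List Int) : List Int :=
  ((PySem.List.enumerate spike_train).foldl isiStep (none, [])).2.reverse

-- ===== PRECONDITION & SPEC =====
def Spec_isi (spike_train : List Int) (out : List Int) : Prop := out = isi_alt spike_train
instance (spike_train : List Int) (out : List Int) : Decidable (Spec_isi spike_train out) := by unfold Spec_isi; infer_instance

-- ===== CLAIM (what is proved, stated in full; the proofs are below) =====
def Claim_equal_isi : Prop := ∀ (spike_train : List Int), Dom_isi spike_train → Spec_isi spike_train (isi spike_train)

-- ===== LEMMAS AND PROOFS =====

/-- adjacent differences of a list of spike times -/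
def pairDiff : List Int → List Int
  | a :: b :: r => (b - a) :: pairDiff (b :: r)
  | _ => []

def optToList : Option Int → List Int
  | none => []
  | some x => [x]

theorem rangeMap_eq_pairDiff (ts : List Int) :
    (List.range (ts.length - 1)).map (fun i => ts.getD (i + 1) 0 - ts.getD i 0)
      = pairDiff ts := by
  match ts with
  | [] => simp [pairDiff]
  | [a] => simp [pairDiff]
  | a :: b :: r =>
    have ih := rangeMap_eq_pairDiff (b :: r)
    have hlen : (a :: b :: r).length - 1 = ((b :: r).length - 1) + 1 := by
      simp
    rw [hlen, List.range_succ_eq_map, List.map_cons, List.map_map]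
    have htail : ((fun i => (a :: b :: r).getD (i + 1) 0 - (a :: b :: r).getD i 0) ∘ Nat.succ)
        = (fun i => (b :: r).getD (i + 1) 0 - (b :: r).getD i 0) := rfl
    rw [htail, ih]
    rfl

theorem foldl_isiStep (l : List (Int × Int)) (last : Option Int) (acc : List Int) :
    (l.foldl isiStep (last, acc)).2.reverse
      = acc.reverse ++ pairDiff (optToList last ++ (l.filter (fun p => p.2 != 0)).map (fun p => p.1)) := by
  induction l generalizing last acc with
  | nil =>
    cases last <;> simp [optToList, pairDiff]
  | cons p l ih =>
    by_cases hp : p.2 = 0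
    · simp [isiStep, hp, ih]
    · cases last with
      | none =>
        simp [isiStep, hp, ih, optToList]
      | some x =>
        have hstep : (isiStep (some x, acc) p) = (some p.1, (p.1 - x) :: acc) := by
          simp [isiStep, hp]
        have hb : (p.2 != 0) = true := by simpa using hp
        rw [List.foldl_cons, hstep, ih]
        simp [optToList, hb, pairDiff]

theorem isi_eq (spike_train : List Int) : isi spike_train = isi_alt spike_train := by
  unfold isi isi_alt
  rw [foldl_isiStep]
  simp only [optToList, List.nil_append]
  set ts := ((PySem.List.enumerate spike_train).filter (fun p => p.2 != 0)).map (fun p => p.1) with hts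
  by_cases h : ts = []
  · simp [h, pairDiff]
  · rw [if_neg h]
    exact rangeMap_eq_pairDiff ts

-- ===== VERDICT (by name: the statement is the Claim_ definition above) =====
theorem isi_spec : Claim_equal_isi := by
  intro l _
  unfold Spec_isi
  exact isi_eq l
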